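-- pv_equiv track=rewrite | github.com/Gotchaha/edinet-agentic | scripts/agreement.py | classify_agreement
-- ===== SOURCE A (Python) =====
-- def classify_agreement(
--     label: int,
--     preds: dict[str, int | None],
-- ) -> str:
--     """Classify a single example's cross-condition agreement pattern.
--
--     Categories:
--     - all_correct:       all conditions predict correctly
--     - all_wrong_same:    all conditions wrong, same direction (all FP or all FN)
--     - all_wrong_mixed:   all conditions wrong, but different directions
--     - some_correct:      mixed — at least one correct and one wrong (reliability issue)
--     """
--     valid_preds = {k: v for k, v in preds.items() if v is not None}
--     if not valid_preds:
--         return "no_valid_predictions"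
--
--     correct = {k for k, v in valid_preds.items() if v == label}
--     wrong = {k for k, v in valid_preds.items() if v != label}
--
--     if len(wrong) == 0:
--         return "all_correct"
--     if len(correct) == 0:
--         # All wrong — check if same direction
--         wrong_dirs = {valid_preds[k] for k in wrong}
--         if len(wrong_dirs) == 1:
--             return "all_wrong_same"
--         return "all_wrong_mixed"
--     return "some_correct"
-- ===== SOURCE B (Python) =====
-- def classify_agreement(
--     label: int,
--     preds: dict[str, int | None],
-- ) -> str:
--     """Classify via the single set of distinct non-None predicted values."""
--     distinct = {v for v in preds.values() if v is not None}
--     if not distinct: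
--         return "no_valid_predictions"
--     if label not in distinct:
--         return "all_wrong_same" if len(distinct) == 1 else "all_wrong_mixed"
--     if len(distinct) == 1:
--         return "all_correct"
--     return "some_correct"
-- ===== Notes on version B (the rewrite author's own statement) =====
-- stated objective: simpler
-- what changed: Instead of partitioning the keys into 'correct' and 'wrong' sets and then building a third set of wrong directions, B builds one set of distinct non-None predicted values and classifies from its size and whether the label is in it; keys are never touched.
import Mathlib
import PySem

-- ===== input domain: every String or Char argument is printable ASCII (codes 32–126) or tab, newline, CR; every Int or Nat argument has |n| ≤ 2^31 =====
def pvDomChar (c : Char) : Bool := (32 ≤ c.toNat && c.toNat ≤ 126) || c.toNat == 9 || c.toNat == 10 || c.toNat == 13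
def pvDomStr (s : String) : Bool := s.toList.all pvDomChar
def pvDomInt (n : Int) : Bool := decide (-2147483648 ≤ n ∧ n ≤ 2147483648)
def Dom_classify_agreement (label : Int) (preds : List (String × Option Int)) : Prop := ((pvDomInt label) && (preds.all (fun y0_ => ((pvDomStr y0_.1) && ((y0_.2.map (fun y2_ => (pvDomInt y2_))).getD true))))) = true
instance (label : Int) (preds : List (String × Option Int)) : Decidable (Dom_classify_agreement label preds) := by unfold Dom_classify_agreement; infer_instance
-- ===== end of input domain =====

-- B classifies from the single set of distinct non-None predicted values instead of
-- partitioning the keys into correct/wrong sets (simpler; return value only, no mutation).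

-- ===== PORT A =====
-- 'preds' encodes a Python dict: both ports read it through PySem.Dict.ofList (last value wins).
def classify_agreement (label : Int) (preds : List (String × Option Int)) : String :=
  let d := PySem.Dict.ofList preds
  -- valid_preds = {k: v for k, v in preds.items() if v is not None}
  let valid : PySem.Dict String Int :=
    PySem.Dict.ofList (d.items.filterMap (fun kv => kv.2.map (fun v => (kv.1, v))))
  if valid.size = 0 then "no_valid_predictions"
  else
    let correct : PySem.Set String :=
      PySem.Set.ofList ((valid.items.filter (fun kv => kv.2 == label)).map (·.1))
    let wrong : PySem.Set String :=
      PySem.Set.ofList ((valid.items.filter (fun kv => !(kv.2 == label))).map (·.1))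
    if PySem.Set.len wrong = 0 then "all_correct"
    else if PySem.Set.len correct = 0 then
      -- valid_preds[k]: every k ∈ wrong is a key of valid, so the default is never read
      let wrong_dirs : PySem.Set Int := PySem.Set.ofList (wrong.map (fun k => valid.getD k 0))
      if PySem.Set.len wrong_dirs = 1 then "all_wrong_same" else "all_wrong_mixed"
    else "some_correct"

-- ===== PORT B =====
def classify_agreement_alt (label : Int) (preds : List (String × Option Int)) : String :=
  -- distinct = {v for v in preds.values() if v is not None}
  let distinct : PySem.Set Int :=
    PySem.Set.ofList ((PySem.Dict.ofList preds).values.filterMap id)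
  if PySem.Set.len distinct = 0 then "no_valid_predictions"
  else if !(PySem.Set.contains distinct label) then
    if PySem.Set.len distinct = 1 then "all_wrong_same" else "all_wrong_mixed"
  else if PySem.Set.len distinct = 1 then "all_correct"
  else "some_correct"

-- ===== PRECONDITION & SPEC =====
def Spec_classify_agreement (label : Int) (preds : List (String × Option Int)) (out : String) : Prop := out = classify_agreement_alt label preds
instance (label : Int) (preds : List (String × Option Int)) (out : String) : Decidable (Spec_classify_agreement label preds out) := by unfold Spec_classify_agreement; infer_instance

-- ===== CLAIM (what is proved, stated in full; the proofs are below) =====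
def Claim_equal_classify_agreement : Prop := ∀ (label : Int) (preds : List (String × Option Int)), Dom_classify_agreement label preds → Spec_classify_agreement label preds (classify_agreement label preds)

-- ===== LEMMAS AND PROOFS =====

-- keys of the None-filtered item list form a sublist of the original keys
lemma keys_filterMap_sublist (L : List (String × Option Int)) :
    List.Sublist ((L.filterMap (fun kv => kv.2.map (fun v => (kv.1, v)))).map Prod.fst) (L.map Prod.fst) := by
  induction L with
  | nil => simp
  | cons kv t ih =>
    cases kv with
    | mk k ov =>
      cases ov with
      | none => simpa using ih.cons _
      | some v => simpa using ih.cons₂ k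

-- values of the None-filtered item list are the non-None values
lemma snd_filterMap (L : List (String × Option Int)) :
    ((L.filterMap (fun kv => kv.2.map (fun v => (kv.1, v)))).map Prod.snd)
      = (L.map Prod.snd).filterMap id := by
  induction L with
  | nil => simp
  | cons kv t ih =>
    cases kv with
    | mk k ov => cases ov <;> simp [ih]

-- Set.ofList is empty iff the list is
lemma ofList_eq_nil_iff {α : Type} [BEq α] [LawfulBEq α] (xs : List α) :
    PySem.Set.ofList xs = [] ↔ xs = [] := by
  constructor
  · intro h
    by_contra hne
    rcases List.exists_mem_of_ne_nil xs hne with ⟨x, hx⟩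
    have : x ∈ PySem.Set.ofList xs := (PySem.Set.mem_ofList _ _).2 hx
    simp [h] at this
  · rintro rfl; rfl

-- a nonempty Nodup list whose members all equal a has length 1 (it is [a])
lemma nodup_all_eq {α : Type} (xs : List α) (a : α) (hn : xs.Nodup)
    (hne : xs ≠ []) (hall : ∀ x ∈ xs, x = a) : xs = [a] := by
  cases xs with
  | nil => exact absurd rfl hne
  | cons x t =>
    have hx : x = a := hall x (by simp)
    cases t with
    | nil => simp [hx]
    | cons y u =>
      have hy : y = a := hall y (by simp)
      subst hx hy
      simp at hn

-- core equivalence on a valid item list with distinct keys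
lemma core_eq (label : Int) (M : List (String × Int)) (hnd : (M.map Prod.fst).Nodup) :
    (let valid := PySem.Dict.mk M
     if valid.size = 0 then "no_valid_predictions"
     else
       let correct : PySem.Set String :=
         PySem.Set.ofList ((M.filter (fun kv => kv.2 == label)).map (·.1))
       let wrong : PySem.Set String :=
         PySem.Set.ofList ((M.filter (fun kv => !(kv.2 == label))).map (·.1))
       if PySem.Set.len wrong = 0 then "all_correct"
       else if PySem.Set.len correct = 0 then
         let wrong_dirs : PySem.Set Int := PySem.Set.ofList (wrong.map (fun k => valid.getD k 0))
         if PySem.Set.len wrong_dirs = 1 then "all_wrong_same" else "all_wrong_mixed"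
       else "some_correct")
    =
    (let distinct : PySem.Set Int := PySem.Set.ofList (M.map Prod.snd)
     if PySem.Set.len distinct = 0 then "no_valid_predictions"
     else if !(PySem.Set.contains distinct label) then
       if PySem.Set.len distinct = 1 then "all_wrong_same" else "all_wrong_mixed"
     else if PySem.Set.len distinct = 1 then "all_correct"
     else "some_correct") := by
  by_cases hM : M = []
  · subst hM; simp [PySem.Set.ofList, PySem.Set.empty, PySem.Set.len, PySem.Dict.size]
  · have hsize : ¬ ((PySem.Dict.mk M).size = 0) := by
      simpa [PySem.Dict.size, List.length_eq_zero_iff] using hM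
    have hvsne : M.map Prod.snd ≠ [] := by simp [hM]
    have hsne : PySem.Set.ofList (M.map Prod.snd) ≠ [] := by
      rw [ne_eq, ofList_eq_nil_iff]; exact hvsne
    have hslen : ¬ (PySem.Set.len (PySem.Set.ofList (M.map Prod.snd)) = 0) := by
      simpa [PySem.Set.len, List.length_eq_zero_iff] using hsne
    rw [if_neg hsize, if_neg hslen]
    by_cases hall : ∀ kv ∈ M, kv.2 = label
    · -- every prediction equals the label: all_correct on both sides
      have hw : M.filter (fun kv => !(kv.2 == label)) = [] := by
        rw [List.filter_eq_nil_iff]; intro kv hkv; simp [hall kv hkv]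
      have hwrong0 : PySem.Set.len
          (PySem.Set.ofList ((M.filter (fun kv => !(kv.2 == label))).map (·.1))) = 0 := by
        rw [hw]; rfl
      have hs : PySem.Set.ofList (M.map Prod.snd) = [label] := by
        refine nodup_all_eq _ _ (PySem.Set.nodup_ofList _) hsne ?_
        intro x hx
        rcases List.mem_map.1 ((PySem.Set.mem_ofList _ _).1 hx) with ⟨kv, hkv, rfl⟩
        exact hall kv hkv
      rw [if_pos hwrong0, hs]
      simp [PySem.Set.contains, PySem.Set.len]
    · push Not at hall
      rcases hall with ⟨kw, hkwM, hkwne⟩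
      have hwne : M.filter (fun kv => !(kv.2 == label)) ≠ [] := by
        intro h
        have := List.filter_eq_nil_iff.1 h kw hkwM
        simp [hkwne] at this
      have hwrongne : PySem.Set.ofList ((M.filter (fun kv => !(kv.2 == label))).map (·.1)) ≠ [] := by
        rw [ne_eq, ofList_eq_nil_iff]; simpa using hwne
      have hwlen : ¬ (PySem.Set.len
          (PySem.Set.ofList ((M.filter (fun kv => !(kv.2 == label))).map (·.1))) = 0) := by
        simpa [PySem.Set.len, List.length_eq_zero_iff] using hwrongne
      rw [if_neg hwlen]
      by_cases hnone : ∀ kv ∈ M, kv.2 ≠ label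
      · -- all wrong, on both sides
        have hc : M.filter (fun kv => kv.2 == label) = [] := by
          rw [List.filter_eq_nil_iff]; intro kv hkv; simpa using hnone kv hkv
        have hc0 : PySem.Set.len
            (PySem.Set.ofList ((M.filter (fun kv => kv.2 == label)).map (·.1))) = 0 := by
          rw [hc]; rfl
        have hwfull : M.filter (fun kv => !(kv.2 == label)) = M := by
          rw [List.filter_eq_self]; intro kv hkv; simpa using hnone kv hkv
        have hcontains : PySem.Set.contains (PySem.Set.ofList (M.map Prod.snd)) label = false := by
          rw [Bool.eq_false_iff, ne_eq, PySem.Set.contains_iff, PySem.Set.mem_ofList]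
          intro h
          rcases List.mem_map.1 h with ⟨kv, hkv, hlab⟩
          exact hnone kv hkv hlab
        have hdirs : ((PySem.Set.ofList ((M.filter (fun kv => !(kv.2 == label))).map (·.1))).map
            (fun k => (PySem.Dict.mk M).getD k 0)) = M.map Prod.snd := by
          rw [hwfull, PySem.Set.ofList_eq_self_of_nodup _ hnd, List.map_map]
          refine List.map_congr_left ?_
          intro kv hkv
          exact PySem.Dict.getD_of_mem_items (PySem.Dict.mk M) hkv hnd 0
        rw [if_pos hc0, hdirs, hcontains]
        simp
      · -- some correct, some wrong
        push Not at hnone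
        rcases hnone with ⟨kc, hkcM, hkceq⟩
        have hcne : M.filter (fun kv => kv.2 == label) ≠ [] := by
          intro h
          have := List.filter_eq_nil_iff.1 h kc hkcM
          simp [hkceq] at this
        have hcorrectne : PySem.Set.ofList ((M.filter (fun kv => kv.2 == label)).map (·.1)) ≠ [] := by
          rw [ne_eq, ofList_eq_nil_iff]; simpa using hcne
        have hclen : ¬ (PySem.Set.len
            (PySem.Set.ofList ((M.filter (fun kv => kv.2 == label)).map (·.1))) = 0) := by
          simpa [PySem.Set.len, List.length_eq_zero_iff] using hcorrectne
        rw [if_neg hclen]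
        have hmemc : label ∈ PySem.Set.ofList (M.map Prod.snd) := by
          rw [PySem.Set.mem_ofList]
          exact List.mem_map.2 ⟨kc, hkcM, hkceq⟩
        have hmemw : kw.2 ∈ PySem.Set.ofList (M.map Prod.snd) := by
          rw [PySem.Set.mem_ofList]
          exact List.mem_map.2 ⟨kw, hkwM, rfl⟩
        have hcontains : PySem.Set.contains (PySem.Set.ofList (M.map Prod.snd)) label = true := by
          rw [PySem.Set.contains_iff]; exact hmemc
        have hlen1 : (PySem.Set.ofList (M.map Prod.snd)).length ≠ 1 := by
          intro h
          rcases List.length_eq_one_iff.1 h with ⟨x, hx⟩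
          rw [hx] at hmemc hmemw
          simp at hmemc hmemw
          exact hkwne (by rw [hmemw, ← hmemc])
        have hlen1' : ¬ (PySem.Set.len (PySem.Set.ofList (M.map Prod.snd)) = 1) := by
          simpa [PySem.Set.len] using hlen1
        rw [hcontains, if_neg hlen1']
        simp
        exact hlen1

-- ===== VERDICT (by name: the statement is the Claim_ definition above) =====
lemma ofList_eq_mk {LV : List (String × Int)} (h : (LV.map Prod.fst).Nodup) :
    PySem.Dict.ofList LV = PySem.Dict.mk LV := by
  apply PySem.Dict.ext
  have := PySem.Dict.items_foldl_insert_fresh LV Prod.fst Prod.snd PySem.Dict.empty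
    (by intro a _; rfl) h
  simpa [PySem.Dict.ofList, PySem.Dict.update, PySem.Dict.empty] using this

theorem classify_agreement_spec : Claim_equal_classify_agreement := by
  intro label preds _
  unfold Spec_classify_agreement classify_agreement classify_agreement_alt
  have hndL : (((PySem.Dict.ofList preds).items.map Prod.fst)).Nodup :=
    PySem.Dict.nodup_keys_ofList preds
  have hndLV : ((((PySem.Dict.ofList preds).items.filterMap
      (fun kv => kv.2.map (fun v => (kv.1, v)))).map Prod.fst)).Nodup :=
    ((keys_filterMap_sublist _).nodup hndL)
  simp only [ofList_eq_mk hndLV]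
  have hvals : (PySem.Dict.ofList preds).values.filterMap id
      = (((PySem.Dict.ofList preds).items.filterMap
          (fun kv => kv.2.map (fun v => (kv.1, v)))).map Prod.snd) := by
    rw [snd_filterMap]; rfl
  simp only [hvals]
  exact core_eq label _ hndLV
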